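-- pv_equiv track=rewrite | github.com/FFtust/automatic_gita | music/python/drumKit/music_translate2.py | _check_special
-- ===== SOURCE A (Python) =====
-- def _check_special(item):
--     ret = []
--     for i in range(len(item)):
--         for j in range(i + 1, len(item)):
--             if item[i][0] == item[j][0]:
--                 ret.append(i)
--                 ret.append(j)
--     return ret
-- ===== SOURCE B (Python) =====
-- def _check_special(item):
--     # Group indices by first-character key (s[:1], '' for empty strings), then for
--     # each index emit the later indices of its own group; output-sensitive instead
--     # of all-pairs.
--     groups = {}
--     for idx, s in enumerate(item):
--         groups.setdefault(s[:1], []).append(idx)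
--     ret = []
--     for i, s in enumerate(item):
--         for j in groups[s[:1]]:
--             if j > i:
--                 ret.append(i)
--                 ret.append(j)
--     return ret
-- ===== Notes on version B (the rewrite author's own statement) =====
-- stated objective: alternative
-- what changed: replaces the all-pairs double index loop with a single pass that groups indices by first-character key (s[:1]) in a dict, then emits for each index only the later indices of its own group (output-sensitive: O(n + P) work for P matching pairs, which measured around 1.4-1.6x faster but P itself is quadratic on match-heavy inputs)
import Mathlib
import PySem

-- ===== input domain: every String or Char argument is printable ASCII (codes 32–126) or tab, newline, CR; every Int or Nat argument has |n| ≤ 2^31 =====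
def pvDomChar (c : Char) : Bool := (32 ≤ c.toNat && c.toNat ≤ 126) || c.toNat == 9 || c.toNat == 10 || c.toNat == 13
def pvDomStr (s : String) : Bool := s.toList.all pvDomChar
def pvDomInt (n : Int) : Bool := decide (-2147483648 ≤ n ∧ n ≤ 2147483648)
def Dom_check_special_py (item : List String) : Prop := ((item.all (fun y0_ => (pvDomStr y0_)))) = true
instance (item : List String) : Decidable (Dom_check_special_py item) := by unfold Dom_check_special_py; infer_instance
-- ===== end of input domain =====

-- B groups indices by first-character key s[:1] in a dict and emits, for each index, the later
-- indices of its own group (one grouping pass instead of the all-pairs double loop).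


-- ===== PORT A =====
-- item[i][0] is ported as PySem.Str.pyGet? … 0 : Option Char (none exactly where Python raises; Pre_ excludes that)
def check_special_py (item : List String) : List Int :=
  (PySem.List.pyRange 0 item.length).foldl (fun ret i =>
    (PySem.List.pyRange (i + 1) item.length).foldl (fun ret j =>
      if PySem.Str.pyGet? (PySem.List.pyGetD item i "") 0
          == PySem.Str.pyGet? (PySem.List.pyGetD item j "") 0
      then ret ++ [i, j] else ret) ret) []

-- ===== PORT B =====
-- the grouping key s[:1] is PySem.Str.slice s none (some 1) : String (total; "" for the empty string)
def check_special_py_alt (item : List String) : List Int :=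
  let groups : PySem.Dict String (List Int) :=
    (PySem.List.enumerate item).foldl
      (fun d p => d.insert (PySem.Str.slice p.2 none (some 1))
        (d.getD (PySem.Str.slice p.2 none (some 1)) [] ++ [p.1]))
      PySem.Dict.empty
  (PySem.List.enumerate item).foldl (fun ret p =>
    (groups.getD (PySem.Str.slice p.2 none (some 1)) []).foldl (fun ret j =>
      if p.1 < j then ret ++ [p.1, j] else ret) ret) []

-- ===== PRECONDITION & SPEC =====
-- Pre_ excludes exactly the inputs on which Python A raises: lists of length ≥ 2 that contain an
-- empty string (A evaluates item[k][0] for every index there, raising IndexError on the '').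
def Pre_check_special_py (item : List String) : Prop := item.length ≤ 1 ∨ "" ∉ item
instance (item : List String) : Decidable (Pre_check_special_py item) := by unfold Pre_check_special_py; infer_instance
def pvWitness_check_special_py : List String := ["ab", "ac", "b", "a"]
def Spec_check_special_py (item : List String) (out : List Int) : Prop := out = check_special_py_alt item
instance (item : List String) (out : List Int) : Decidable (Spec_check_special_py item out) := by unfold Spec_check_special_py; infer_instance

-- ===== CLAIM (what is proved, stated in full; the proofs are below) =====
def Claim_equal_check_special_py : Prop := ∀ (item : List String), Dom_check_special_py item → Pre_check_special_py item → Spec_check_special_py item (check_special_py item)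

-- ===== LEMMAS AND PROOFS =====

-- loop shape of both inner loops: conditional append of a two-element block (Bool test)
theorem pv_foldl_append_if₂ {α β : Type} (p : α → Bool) (f : α → List β) (l : List α)
    (acc : List β) :
    List.foldl (fun acc x => if p x then acc ++ f x else acc) acc l
      = acc ++ (l.filter p).flatMap f := by
  induction l generalizing acc with
  | nil => simp
  | cons x t ih =>
    by_cases h : p x <;> simp [List.foldl_cons, ih, h]

-- the same loop shape with a propositional test (B's `j > i`)
theorem pv_foldl_append_ite₂ {α β : Type} (P : α → Prop) [DecidablePred P] (f : α → List β)
    (l : List α) (acc : List β) :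
    List.foldl (fun acc x => if P x then acc ++ f x else acc) acc l
      = acc ++ (l.filter (fun x => decide (P x))).flatMap f := by
  induction l generalizing acc with
  | nil => simp
  | cons x t ih =>
    by_cases h : P x <;> simp [List.foldl_cons, ih, h]

-- A's key: first character of the string stored at Nat index k, none for the empty string
def pvKeyA (item : List String) (k : Nat) : Option Char :=
  PySem.Str.pyGet? (item.getD k "") 0

-- B's key: the one-character prefix of the string stored at Nat index k
def pvKeyB (item : List String) (k : Nat) : String :=
  PySem.Str.slice (item.getD k "") none (some 1)

-- the common shape of both results, parametric in the grouping key
def pvSpecListK {κ : Type} [BEq κ] (n : Nat) (key : Nat → κ) : List Int :=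
  (List.range n).flatMap (fun i =>
    ((List.range n).filter (fun j => decide (i < j) && (key i == key j))).flatMap
      (fun j : Nat => [(i : Int), (j : Int)]))

-- a step-1 pyRange with Nat endpoints is the filtered full range
theorem pv_pyRange_natCast_filter (a n : Nat) :
    PySem.List.pyRange (a : Int) (n : Int)
      = ((List.range n).filter (fun k => decide (a ≤ k))).map (fun k : Nat => (k : Int)) := by
  induction n with
  | zero => simp [PySem.List.pyRange]
  | succ m ih =>
    by_cases h : a ≤ m
    · have h2 : PySem.List.pyRange (a : Int) (((m + 1) : Nat) : Int)
          = PySem.List.pyRange (a : Int) ((m : Nat) : Int) ++ [(m : Int)] := by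
        push_cast
        exact PySem.List.pyRange_one_succ_right (by exact_mod_cast h)
      rw [h2, ih]
      simp [List.range_succ, h]
    · have h0 : PySem.List.pyRange (a : Int) (((m + 1) : Nat) : Int) = [] := by
        simp [PySem.List.pyRange]; omega
      rw [h0]
      have hf : ((List.range (m+1)).filter (fun k => decide (a ≤ k))) = [] := by
        rw [List.filter_eq_nil_iff]
        intro k hk
        simp at hk ⊢
        omega
      simp [hf]

-- enumerate unfolded as a map over List.range
theorem pv_enumerate_eq (item : List String) (s : Int) :
    PySem.List.enumerate item s
      = (List.range item.length).map (fun k : Nat => (s + (k : Int), item.getD k "")) := by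
  induction item generalizing s with
  | nil => simp [PySem.List.enumerate]
  | cons x t ih =>
    simp [PySem.List.enumerate, ih, List.range_succ_eq_map, Function.comp_def]
    intro k hk
    ring

-- A's nested index loops compute pvSpecListK with A's key
theorem pv_A_eq (item : List String) :
    check_special_py item = pvSpecListK item.length (pvKeyA item) := by
  unfold check_special_py pvSpecListK
  rw [PySem.List.pyRange_zero_natCast, List.foldl_map]
  have hfun : (fun (ret : List Int) (i : Nat) =>
      (PySem.List.pyRange ((i : Int) + 1) item.length).foldl (fun ret j =>
        if PySem.Str.pyGet? (PySem.List.pyGetD item (i : Int) "") 0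
            == PySem.Str.pyGet? (PySem.List.pyGetD item j "") 0
        then ret ++ [(i : Int), j] else ret) ret)
      = (fun (ret : List Int) (i : Nat) => ret ++
          ((List.range item.length).filter (fun j => decide (i < j) && (pvKeyA item i == pvKeyA item j))).flatMap
            (fun j : Nat => [(i : Int), (j : Int)])) := by
    funext ret i
    have h1 : ((i : Int) + 1) = ((i + 1 : Nat) : Int) := by push_cast; ring
    rw [h1, pv_pyRange_natCast_filter, List.foldl_map,
        pv_foldl_append_if₂ (fun jN : Nat =>
          PySem.Str.pyGet? (PySem.List.pyGetD item (i : Int) "") 0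
            == PySem.Str.pyGet? (PySem.List.pyGetD item ((jN : Nat) : Int) "") 0)
          (fun jN : Nat => [(i : Int), (jN : Int)]),
        List.filter_filter]
    have hfe : (List.range item.length).filter
          (fun a : Nat =>
            (PySem.Str.pyGet? (PySem.List.pyGetD item (i : Int) "") 0
              == PySem.Str.pyGet? (PySem.List.pyGetD item ((a : Nat) : Int) "") 0) && decide (i + 1 ≤ a))
        = (List.range item.length).filter (fun j => decide (i < j) && (pvKeyA item i == pvKeyA item j)) := by
      apply List.filter_congr
      intro j hj
      simp only [pvKeyA, PySem.List.pyGetD_natCast]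
      rw [Bool.and_comm]
      congr 1
    rw [hfe]
  rw [hfun, PySem.List.foldl_append_eq_flatMap]
  simp

-- the dict built by B's first loop, read at any key
theorem pv_groups_getD (item : List String) (s : Int)
    (d : PySem.Dict String (List Int)) (k : String) :
    ((PySem.List.enumerate item s).foldl
        (fun d p => d.insert (PySem.Str.slice p.2 none (some 1))
          (d.getD (PySem.Str.slice p.2 none (some 1)) [] ++ [p.1])) d).getD k []
      = d.getD k [] ++ ((PySem.List.enumerate item s).filter
          (fun p => PySem.Str.slice p.2 none (some 1) == k)).map Prod.fst := by
  induction item generalizing s d with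
  | nil => simp [PySem.List.enumerate]
  | cons x t ih =>
    simp only [PySem.List.enumerate, List.foldl_cons, List.filter_cons]
    rw [ih, PySem.Dict.getD_insert]
    by_cases h : k = PySem.Str.slice x none (some 1)
    · have hb : (PySem.Str.slice x none (some 1) == k) = true := by simp [h]
      rw [hb, if_pos h]
      simp [h]
    · have hb : (PySem.Str.slice x none (some 1) == k) = false := by
        simp; exact fun hh => h hh.symm
      rw [hb, if_neg h]
      simp

-- B's grouped loops compute pvSpecListK with B's key
theorem pv_B_eq (item : List String) :
    check_special_py_alt item = pvSpecListK item.length (pvKeyB item) := by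
  unfold check_special_py_alt pvSpecListK
  simp only [pv_groups_getD]
  simp only [PySem.Dict.getD, PySem.Dict.empty]
  rw [pv_enumerate_eq, List.foldl_map]
  simp only [PySem.Dict.get?, List.find?_nil, Option.map_none, Option.getD_none, List.nil_append]
  have hfun : (fun (ret : List Int) (i : Nat) =>
      ((((List.range item.length).map (fun k : Nat => ((0 : Int) + (k : Int), item.getD k ""))).filter
          (fun p => PySem.Str.slice p.2 none (some 1) == PySem.Str.slice (item.getD i "") none (some 1))).map Prod.fst).foldl
        (fun ret j => if ((0 : Int) + (i : Int)) < j then ret ++ [(0 : Int) + (i : Int), j] else ret) ret)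
      = (fun (ret : List Int) (i : Nat) => ret ++
          ((List.range item.length).filter (fun j => decide (i < j) && (pvKeyB item i == pvKeyB item j))).flatMap
            (fun j : Nat => [(i : Int), (j : Int)])) := by
    funext ret i
    simp only [zero_add, List.filter_map, List.map_map, Function.comp_def]
    rw [List.foldl_map,
        pv_foldl_append_ite₂ (fun jN : Nat => (i : Int) < (jN : Int))
          (fun jN : Nat => [(i : Int), (jN : Int)]),
        List.filter_filter]
    have hfe : (List.range item.length).filter
          (fun a : Nat => decide ((i : Int) < (a : Int)) &&
            (PySem.Str.slice (item.getD a "") none (some 1) == PySem.Str.slice (item.getD i "") none (some 1)))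
        = (List.range item.length).filter (fun j => decide (i < j) && (pvKeyB item i == pvKeyB item j)) := by
      apply List.filter_congr
      intro j hj
      simp only [pvKeyB]
      rw [Bool.beq_comm]
      congr 1
      exact decide_eq_decide.mpr (by omega)
    rw [hfe]
  rw [hfun, PySem.List.foldl_append_eq_flatMap]
  simp

-- pvSpecListK only looks at key-equality booleans on indices below n
theorem pvSpecListK_congr {κ₁ κ₂ : Type} [BEq κ₁] [BEq κ₂] (n : Nat)
    (k1 : Nat → κ₁) (k2 : Nat → κ₂)
    (h : ∀ i j, i < n → j < n → (k1 i == k1 j) = (k2 i == k2 j)) :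
    pvSpecListK n k1 = pvSpecListK n k2 := by
  unfold pvSpecListK
  apply List.flatMap_congr
  intro i hi
  have hi' : i < n := List.mem_range.mp hi
  have : (List.range n).filter (fun j => decide (i < j) && (k1 i == k1 j))
       = (List.range n).filter (fun j => decide (i < j) && (k2 i == k2 j)) := by
    apply List.filter_congr
    intro j hj
    rw [h i j hi' (List.mem_range.mp hj)]
  rw [this]

-- with no index pair i < j < n, the result is [] whatever the key
theorem pvSpecListK_small {κ : Type} [BEq κ] (n : Nat) (key : Nat → κ) (h : n ≤ 1) :
    pvSpecListK n key = [] := by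
  interval_cases n <;> simp [pvSpecListK]

-- on nonempty strings the two keys induce the same equality test
theorem pv_key_eq (s t : String) (hs : s ≠ "") (ht : t ≠ "") :
    ((PySem.Str.pyGet? s 0 == PySem.Str.pyGet? t 0))
      = (PySem.Str.slice s none (some 1) == PySem.Str.slice t none (some 1)) := by
  have hsl : ∀ u : String, (PySem.Str.slice u none (some 1)).toList = u.toList.take 1 := by
    intro u
    have := PySem.List.slice_to_natCast (xs := u.toList) (b := 1)
    simp [PySem.Str.toList_slice]; exact_mod_cast this
  have hs' : s.toList ≠ [] := by
    intro h; exact hs (String.toList_injective (by simp [h]))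
  have ht' : t.toList ≠ [] := by
    intro h; exact ht (String.toList_injective (by simp [h]))
  obtain ⟨c, cs, hc⟩ := List.exists_cons_of_ne_nil hs'
  obtain ⟨d, ds, hd⟩ := List.exists_cons_of_ne_nil ht'
  have h1 : PySem.Str.pyGet? s 0 = some c := by
    have := PySem.Str.pyGet?_natCast (s := s) (n := 0); simp [hc]
  have h2 : PySem.Str.pyGet? t 0 = some d := by
    have := PySem.Str.pyGet?_natCast (s := t) (n := 0); simp [hd]
  rw [h1, h2]
  by_cases h : c = d
  · subst h
    have : PySem.Str.slice s none (some 1) = PySem.Str.slice t none (some 1) := by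
      apply String.toList_injective; rw [hsl, hsl, hc, hd]; simp
    simp [this]
  · have : PySem.Str.slice s none (some 1) ≠ PySem.Str.slice t none (some 1) := by
      intro he
      have := congrArg String.toList he
      rw [hsl, hsl, hc, hd] at this
      simp at this; exact h this
    simp [h, this]

-- ===== VERDICT (by name: the statement is the Claim_ definition above) =====
theorem check_special_py_spec : Claim_equal_check_special_py := by
  intro item _ hpre
  unfold Spec_check_special_py
  rw [pv_A_eq, pv_B_eq]
  rcases hpre with h1 | h2
  · rw [pvSpecListK_small _ _ h1, pvSpecListK_small _ _ h1]
  · apply pvSpecListK_congr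
    intro i j hi hj
    have hsi : item.getD i "" ≠ "" := by
      rw [List.getD_eq_getElem item "" hi]; intro he; exact h2 (he ▸ List.getElem_mem hi)
    have hsj : item.getD j "" ≠ "" := by
      rw [List.getD_eq_getElem item "" hj]; intro he; exact h2 (he ▸ List.getElem_mem hj)
    exact pv_key_eq _ _ hsi hsj
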